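-- pv_equiv track=rewrite | github.com/Dhruvsh02/DSA | array/xor_subarray.py | solve
-- ===== SOURCE A (Python) =====
-- from typing import List
--
-- def solve(A: List[int]) -> int:
--     n = len(A)
--     ans = 0 # will add values in it
--     for i in range(n):
--         # Count how many subarrays include A[i]
--         count = (i + 1) * (n - i)
--         if count % 2 == 1:   # odd -> contributes
--             ans ^= A[i]    # Xor using return 1 if dfferent and returns 0 if same value
--     return ans
-- ===== SOURCE B (Python) =====
-- from typing import List
--
-- def solve(A: List[int]) -> int:
--     # (i+1)*(len(A)-i) is odd iff len(A) is odd and i is even, so even-length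
--     # arrays give 0; otherwise walk the elements once, XOR-ing every other one
--     # in with a toggle flag (no index arithmetic at all).
--     if len(A) % 2 == 0:
--         return 0
--     ans = 0
--     take = True
--     for x in A:
--         if take:
--             ans ^= x
--         take = not take
--     return ans
-- ===== Notes on version B (the rewrite author's own statement) =====
-- stated objective: faster
-- what changed: Replaces the per-index subarray-count parity test (i+1)*(n-i) by its closed form: an immediate 0 for even-length input, else one index-free pass over the elements XOR-ing every other element in via a toggle flag, dropping the per-element multiplication, modulo and indexing.
import Mathlib
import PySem

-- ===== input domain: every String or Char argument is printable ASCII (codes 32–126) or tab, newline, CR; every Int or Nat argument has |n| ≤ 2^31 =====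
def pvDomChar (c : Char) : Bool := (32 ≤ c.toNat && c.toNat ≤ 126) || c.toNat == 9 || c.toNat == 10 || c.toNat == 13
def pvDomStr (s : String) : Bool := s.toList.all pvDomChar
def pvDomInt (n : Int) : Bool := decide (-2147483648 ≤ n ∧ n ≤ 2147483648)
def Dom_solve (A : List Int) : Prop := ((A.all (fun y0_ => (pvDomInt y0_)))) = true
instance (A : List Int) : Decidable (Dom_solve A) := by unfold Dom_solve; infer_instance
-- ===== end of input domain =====

-- B replaces A's per-index parity test of (i+1)*(n-i) by its closed form:
-- 0 for even-length input, else one index-free pass XOR-ing every other element via a toggle flag.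


-- ===== PORT A =====
def solve (A : List Int) : Int :=
  let n : Int := A.length
  (PySem.List.pyRange 0 n 1).foldl
    (fun ans i =>
      let count := (i + 1) * (n - i)
      if PySem.Int.mod count 2 = 1 then PySem.Int.bxor ans (PySem.List.pyGetD A i 0) else ans) 0

-- ===== PORT B =====
def solve_alt (A : List Int) : Int :=
  if PySem.Int.mod (A.length : Int) 2 = 0 then 0
  else
    (A.foldl (fun s x => (if s.2 then PySem.Int.bxor s.1 x else s.1, !s.2))
      ((0 : Int), true)).1

-- ===== PRECONDITION & SPEC =====
def Spec_solve (A : List Int) (out : Int) : Prop := out = solve_alt A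
instance (A : List Int) (out : Int) : Decidable (Spec_solve A out) := by unfold Spec_solve; infer_instance

-- ===== CLAIM (what is proved, stated in full; the proofs are below) =====
def Claim_equal_solve : Prop := ∀ (A : List Int), Dom_solve A → Spec_solve A (solve A)

-- ===== LEMMAS AND PROOFS =====

-- the elements B's toggle flag selects: every other one, starting with the first when b = true
def pvSel (b : Bool) : List Int → List Int
  | [] => []
  | x :: xs => if b then x :: pvSel (!b) xs else pvSel (!b) xs

-- B's toggle fold XORs exactly the selected elements
theorem pvToggleFold : ∀ (xs : List Int) (a : Int) (b : Bool),
    (xs.foldl (fun s x => (if s.2 then PySem.Int.bxor s.1 x else s.1, !s.2)) (a, b)).1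
      = (pvSel b xs).foldl PySem.Int.bxor a := by
  intro xs
  induction xs with
  | nil => intro a b; simp [pvSel]
  | cons x xs ih =>
    intro a b
    cases b <;> simp [pvSel, List.foldl, ih]

-- the even-indexed elements are the ones pvSel true picks
theorem pvMapSel : ∀ (xs : List Int),
    (List.range ((xs.length + 1) / 2)).map (fun k => xs.getD (2 * k) 0)
      = pvSel true xs
  | [] => by simp [pvSel]
  | [x] => by simp [pvSel, List.range_succ]
  | x :: y :: r => by
    have hl : ((x :: y :: r).length + 1) / 2 = (r.length + 1) / 2 + 1 := by
      simp; omega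
    rw [hl, List.range_succ_eq_map, List.map_cons, List.map_map]
    have hr := pvMapSel r
    simp only [pvSel, Bool.not_true, Bool.not_false, if_true, Bool.false_eq_true,
      if_false, Nat.mul_zero, List.getD_cons_zero, List.cons.injEq, true_and]
    rw [← hr]
    apply List.map_congr_left
    intro k _
    simp only [Function.comp_apply]
    have h2 : 2 * Nat.succ k = (2 * k + 1) + 1 := by omega
    rw [h2, List.getD_cons_succ, List.getD_cons_succ]

-- a conditional foldl is a foldl over the filtered list
theorem pvFoldlIfFilter {α β : Type} (p : α → Bool) (f : β → α → β) :
    ∀ (l : List α) (init : β),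
      l.foldl (fun a x => if p x then f a x else a) init = (l.filter p).foldl f init := by
  intro l
  induction l with
  | nil => intro init; simp
  | cons x xs ih =>
    intro init
    by_cases hx : p x
    · simp [hx, ih]
    · simp [hx, ih]

-- the even numbers below m are 2*k for k < (m+1)/2
theorem pvFilterEvenRange :
    ∀ (m : Nat), (List.range m).filter (fun k => k % 2 == 0)
      = (List.range ((m + 1) / 2)).map (fun k => 2 * k) := by
  intro m
  induction m with
  | zero => simp
  | succ m ih =>
    rw [List.range_succ, List.filter_append, ih]
    by_cases hm : m % 2 = 0
    · have h2 : (m + 1 + 1) / 2 = (m + 1) / 2 + 1 := by omega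
      have h3 : 2 * ((m + 1) / 2) = m := by omega
      simp [hm, h2, List.range_succ, h3]
    · have h2 : (m + 1 + 1) / 2 = (m + 1) / 2 := by omega
      simp [hm, h2]

theorem pvProdModTwo (a b : Int) :
    a * b % 2 = 1 ↔ a % 2 = 1 ∧ b % 2 = 1 := by
  rw [Int.mul_emod]
  have ha : a % 2 = 0 ∨ a % 2 = 1 := by omega
  have hb : b % 2 = 0 ∨ b % 2 = 1 := by omega
  rcases ha with ha | ha <;> rcases hb with hb | hb <;> rw [ha, hb] <;> simp

-- ===== VERDICT (by name: the statement is the Claim_ definition above) =====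
theorem solve_spec : Claim_equal_solve := by
  intro A _
  show solve A = solve_alt A
  unfold solve solve_alt
  simp only []
  set m : Nat := A.length with hm
  -- A side: fold over List.range m in Nat form
  rw [PySem.List.pyRange_one, List.foldl_map,
    show (((m : Int) - 0).toNat) = m from by omega]
  rw [PySem.List.foldl_congr_mem _ _
    (fun ans k => if ((m % 2 == 1) && (k % 2 == 0) : Bool)
        then PySem.Int.bxor ans (A.getD k 0) else ans) 0
    (by
      intro acc k hk
      have hk' : k < m := List.mem_range.mp hk
      have hcond : PySem.Int.mod ((0 + (k : Int) + 1) * ((m : Int) - (0 + (k : Int)))) 2 = 1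
          ↔ (m % 2 = 1 ∧ k % 2 = 0) := by
        rw [PySem.Int.mod_eq_emod_of_pos (by omega)]
        rw [pvProdModTwo]
        omega
      by_cases hc : m % 2 = 1 ∧ k % 2 = 0
      · simp only [if_pos (hcond.mpr hc)]
        have : ((0 : Int) + (k : Int)) = ((k : Nat) : Int) := by ring
        rw [this, PySem.List.pyGetD_natCast]
        simp [hc.1, hc.2]
      · simp only [if_neg (fun h => hc (hcond.mp h))]
        rcases Decidable.not_and_iff_not_or_not.mp hc with h | h <;>
          simp at h <;> simp [h])]
  rw [pvFoldlIfFilter]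
  by_cases hpar : m % 2 = 0
  · -- even length: the filter is empty and B returns 0 directly
    have hB : PySem.Int.mod (m : Int) 2 = 0 := by
      rw [PySem.Int.mod_eq_emod_of_pos (by omega)]; omega
    rw [if_pos hB]
    have : (List.range m).filter (fun k => ((m % 2 == 1) && (k % 2 == 0) : Bool)) = [] := by
      apply List.filter_eq_nil_iff.mpr
      intro k _
      simp [hpar]
    rw [this]
    rfl
  · -- odd length: A XORs the even-indexed elements, which are exactly pvSel true A,
    -- and B's toggle fold computes the same XOR
    have hodd : m % 2 = 1 := by omega
    have hB : ¬ PySem.Int.mod (m : Int) 2 = 0 := by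
      rw [PySem.Int.mod_eq_emod_of_pos (by omega)]; omega
    rw [if_neg hB]
    have hfe : (List.range m).filter (fun k => ((m % 2 == 1) && (k % 2 == 0) : Bool))
        = (List.range m).filter (fun k => k % 2 == 0) := by
      apply List.filter_congr
      intro k _
      simp [hodd]
    rw [hfe, pvFilterEvenRange, List.foldl_map,
      show (fun (ans : Int) (k : Nat) => PySem.Int.bxor ans (A.getD (2 * k) 0))
          = (fun ans k => PySem.Int.bxor ans ((fun j => A.getD (2 * j) 0) k)) from rfl,
      ← List.foldl_map (g := PySem.Int.bxor) (f := fun j => A.getD (2 * j) 0), hm, pvMapSel,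
      ← pvToggleFold]
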